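-- pv_equiv track=rewrite | github.com/IkeoluwaStat/pyCARM | pyCARM/basics.py | selected_path
-- ===== SOURCE A (Python) =====
-- def selected_path(vehicles, paths_title):
--     paths_arr = {}
--     num_paths = len(paths_title)
--
--     # Calculate base count and remainder
--     base_count = vehicles // num_paths
--     remainder = vehicles % num_paths
--
--     vehicle_id = 1
--     for i, path in enumerate(paths_title):
--         # Distribute base count + 1 for the first `remainder` paths
--         count = base_count + (1 if i < remainder else 0)
--         for _ in range(count):
--             paths_arr[vehicle_id] = path
--             vehicle_id += 1
--
--     return paths_arr
-- ===== SOURCE B (Python) =====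
-- def selected_path(vehicles, paths_title):
--     num_paths = len(paths_title)
--     base_count = vehicles // num_paths
--     remainder = vehicles % num_paths
--     cutoff = remainder * (base_count + 1)
--     paths_arr = {}
--     for v in range(1, vehicles + 1):
--         i = v - 1
--         if i < cutoff:
--             idx = i // (base_count + 1)
--         else:
--             idx = remainder + (i - cutoff) // base_count
--         paths_arr[v] = paths_title[idx]
--     return paths_arr
-- ===== Notes on version B (the rewrite author's own statement) =====
-- stated objective: faster
-- what changed: B replaces A's nested loops (per path, emit count copies into the dict) by a single flat loop over vehicle IDs that computes each vehicle's path index with a closed-form floor-division formula (i//(base+1) before the remainder cutoff, remainder+(i-cutoff)//base after).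
import Mathlib
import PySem

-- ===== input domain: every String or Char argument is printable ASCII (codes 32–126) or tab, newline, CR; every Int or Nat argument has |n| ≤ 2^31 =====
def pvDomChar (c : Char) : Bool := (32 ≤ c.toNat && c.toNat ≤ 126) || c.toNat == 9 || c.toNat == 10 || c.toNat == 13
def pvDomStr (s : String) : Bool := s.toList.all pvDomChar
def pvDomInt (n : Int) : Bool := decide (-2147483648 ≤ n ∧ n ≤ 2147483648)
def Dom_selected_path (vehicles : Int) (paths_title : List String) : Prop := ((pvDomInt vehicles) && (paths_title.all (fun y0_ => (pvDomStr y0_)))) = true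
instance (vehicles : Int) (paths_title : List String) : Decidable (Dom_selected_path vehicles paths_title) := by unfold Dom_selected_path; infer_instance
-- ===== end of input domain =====

-- B re-implements A's round-robin distribution with a single flat loop over vehicle IDs and a
-- closed-form floor-division index formula, instead of A's nested per-path emission loops.

-- ===== PORT A =====
-- A-side helper: the body of the inner 'for _ in range(count)' loop (paths_arr[vehicle_id] = path; vehicle_id += 1)
def pvInner (p : String) (st : PySem.Dict Int String × Int) : PySem.Dict Int String × Int :=
  (st.1.insert st.2 p, st.2 + 1)

def selected_path (vehicles : Int) (paths_title : List String) : List (Int × String) :=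
  let numPaths : Int := PySem.List.len paths_title
  let baseCount := PySem.Int.floordiv vehicles numPaths
  let remainder := PySem.Int.mod vehicles numPaths
  let final :=
    (PySem.List.enumerate paths_title 0).foldl
      (fun st ip =>
        (PySem.List.pyRange 0 (baseCount + (if ip.1 < remainder then 1 else 0)) 1).foldl
          (fun st2 _ => pvInner ip.2 st2) st)
      (PySem.Dict.empty, 1)
  final.1.items

-- ===== PORT B =====
-- B-side helper: the closed-form path index of 0-based vehicle i
def pvIdx (baseCount remainder cutoff : Int) (i : Int) : Int :=
  if i < cutoff then PySem.Int.floordiv i (baseCount + 1)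
  else remainder + PySem.Int.floordiv (i - cutoff) baseCount

def selected_path_alt (vehicles : Int) (paths_title : List String) : List (Int × String) :=
  let numPaths : Int := PySem.List.len paths_title
  let baseCount := PySem.Int.floordiv vehicles numPaths
  let remainder := PySem.Int.mod vehicles numPaths
  let cutoff := remainder * (baseCount + 1)
  -- paths_title[idx] is always in range here; pyGetD's default is never used under Pre_
  ((PySem.List.pyRange 1 (vehicles + 1) 1).foldl
    (fun d v => d.insert v (PySem.List.pyGetD paths_title (pvIdx baseCount remainder cutoff (v - 1)) ""))
    PySem.Dict.empty).items

-- ===== PRECONDITION & SPEC =====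
-- Pre_ excludes exactly the empty path list, on which both Pythons raise ZeroDivisionError.
def Pre_selected_path (vehicles : Int) (paths_title : List String) : Prop := paths_title ≠ []
instance (vehicles : Int) (paths_title : List String) : Decidable (Pre_selected_path vehicles paths_title) := by
  unfold Pre_selected_path; infer_instance
def pvWitness_selected_path : Int × List String := (5, ["a", "b"])

def Spec_selected_path (vehicles : Int) (paths_title : List String) (out : List (Int × String)) : Prop := out = selected_path_alt vehicles paths_title
instance (vehicles : Int) (paths_title : List String) (out : List (Int × String)) : Decidable (Spec_selected_path vehicles paths_title out) := by unfold Spec_selected_path; infer_instance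

-- ===== CLAIM (what is proved, stated in full; the proofs are below) =====
def Claim_equal_selected_path : Prop := ∀ (vehicles : Int) (paths_title : List String), Dom_selected_path vehicles paths_title → Pre_selected_path vehicles paths_title → Spec_selected_path vehicles paths_title (selected_path vehicles paths_title)

-- ===== LEMMAS AND PROOFS =====

-- the inner emission loop appends L.length entries with fresh consecutive keys and advances the id
lemma pv_inner_spec (p : String) : ∀ (L : List Int) (d : PySem.Dict Int String) (s : Int),
    (∀ x ∈ d.keys, x < s) →
    (L.foldl (fun st2 _ => pvInner p st2) (d, s)).2 = s + L.length ∧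
    (L.foldl (fun st2 _ => pvInner p st2) (d, s)).1.items
      = d.items ++ (PySem.List.pyRange s (s + L.length) 1).map (fun i => (i, p)) ∧
    (∀ x ∈ (L.foldl (fun st2 _ => pvInner p st2) (d, s)).1.keys, x < s + L.length) := by
  intro L
  induction L with
  | nil =>
    intro d s hk
    refine ⟨by simp, by simp [PySem.List.pyRange_one_eq_nil (le_refl s)], by simpa using hk⟩
  | cons a L ih =>
    intro d s hk
    have hcont : d.contains s = false := by
      rw [PySem.Dict.contains_eq_decide_mem_keys]
      simp only [decide_eq_false_iff_not]
      intro hmem; exact absurd (hk s hmem) (lt_irrefl s)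
    have hk' : ∀ x ∈ (d.insert s p).keys, x < s + 1 := by
      intro x hx
      rw [PySem.Dict.keys_insert_of_not_contains d p hcont] at hx
      rcases List.mem_append.mp hx with h | h
      · exact lt_trans (hk x h) (by omega)
      · simp at h; omega
    have step : (a :: L).foldl (fun st2 _ => pvInner p st2) (d, s)
        = L.foldl (fun st2 _ => pvInner p st2) (d.insert s p, s + 1) := by
      simp [List.foldl_cons, pvInner]
    rw [step]
    obtain ⟨h2, h1, h3⟩ := ih (d.insert s p) (s + 1) hk'
    refine ⟨by rw [h2]; simp [List.length_cons]; ring, ?_, ?_⟩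
    · rw [h1, PySem.Dict.items_insert_of_not_contains d p hcont]
      have hsplit : PySem.List.pyRange s (s + ((a :: L).length : Int)) 1
          = s :: PySem.List.pyRange (s + 1) (s + ((a :: L).length : Int)) 1 :=
        PySem.List.pyRange_one_cons (by simp only [List.length_cons]; push_cast; omega)
      rw [hsplit]
      simp only [List.map_cons, List.append_assoc, List.singleton_append]
      congr 3
      simp [List.length_cons]; ring
    · intro x hx
      have := h3 x hx
      simp only [List.length_cons] at *
      push_cast at this ⊢; omega

-- reindexing a mapped range by +1
lemma pv_map_shift {α : Type} (a b : Int) (g : Int → α) :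
    (PySem.List.pyRange a b 1).map g = (PySem.List.pyRange (a+1) (b+1) 1).map (fun i => g (i-1)) := by
  rw [PySem.List.pyRange_one, PySem.List.pyRange_one]
  simp only [List.map_map]
  have : b + 1 - (a + 1) = b - a := by ring
  rw [this]
  apply List.map_congr_left
  intro k _
  simp only [Function.comp]
  congr 1
  ring

-- the closed-form index formula is constant = k on block k of the count prefix sums
lemma pv_idx_block (b r k i : Int) (hb : 0 ≤ b)
    (h1 : k * b + min k r ≤ i) (h2 : i < (k + 1) * b + min (k + 1) r) :
    pvIdx b r (r * (b + 1)) i = k := by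
  unfold pvIdx
  by_cases hkr : k < r
  · have hm1 : min k r = k := by omega
    have hm2 : min (k + 1) r = k + 1 := by omega
    rw [hm1] at h1; rw [hm2] at h2
    have hlt : i < r * (b + 1) := by nlinarith
    rw [if_pos hlt]
    rw [PySem.Int.floordiv_eq_iff_of_pos (by omega)]
    constructor <;> nlinarith
  · have hm1 : min k r = r := by omega
    have hm2 : min (k + 1) r = r := by omega
    rw [hm1] at h1; rw [hm2] at h2
    have hbpos : 0 < b := by nlinarith
    have hge : r * (b + 1) ≤ i := by nlinarith
    rw [if_neg (by omega)]
    have : PySem.Int.floordiv (i - r * (b + 1)) b = k - r := by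
      rw [PySem.Int.floordiv_eq_iff_of_pos hbpos]
      constructor <;> nlinarith
    rw [this]; ring

-- prefix sums of the counts are monotone
lemma pv_S_mono (b r : Int) (hb : 0 ≤ b) (x y : Int) (hxy : x ≤ y) :
    x * b + min x r ≤ y * b + min y r := by
  have := mul_le_mul_of_nonneg_right hxy hb
  omega

-- A's outer loop, from path index k onward
lemma pv_outer_spec (pt : List String) (b r : Int) (hb : 0 ≤ b) :
    ∀ (l : List String) (k : Nat), pt.drop k = l → k ≤ pt.length →
    ∀ (d : PySem.Dict Int String),
    (∀ x ∈ d.keys, x < (k : Int) * b + min (k : Int) r + 1) →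
    ((PySem.List.enumerate l k).foldl
       (fun st ip =>
         (PySem.List.pyRange 0 (b + (if ip.1 < r then 1 else 0)) 1).foldl
           (fun st2 _ => pvInner ip.2 st2) st)
       (d, (k : Int) * b + min (k : Int) r + 1)).1.items
    = d.items ++ (PySem.List.pyRange ((k : Int) * b + min (k : Int) r)
                    ((pt.length : Int) * b + min (pt.length : Int) r) 1).map
        (fun i => (i + 1, PySem.List.pyGetD pt (pvIdx b r (r * (b + 1)) i) "")) := by
  intro l
  induction l with
  | nil =>
    intro k hdrop hk d hkeys
    have hkn : k = pt.length := by
      have := List.drop_eq_nil_iff.mp hdrop; omega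
    subst hkn
    simp [PySem.List.enumerate_nil, PySem.List.pyRange_one_eq_nil (le_refl _)]
  | cons x l ih =>
    intro k hdrop hk d hkeys
    have hklt : k < pt.length := by
      by_contra h
      rw [List.drop_eq_nil_iff.mpr (by omega)] at hdrop
      exact absurd hdrop (by simp)
    have hx : pt.drop k = pt[k] :: pt.drop (k + 1) := List.drop_eq_getElem_cons hklt
    rw [hdrop] at hx
    obtain ⟨hxeq, hleq'⟩ := List.cons_eq_cons.mp hx
    have hleq : pt.drop (k + 1) = l := hleq'.symm
    rw [PySem.List.enumerate_cons, List.foldl_cons]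
    set S : Int → Int := fun t => t * b + min t r with hS
    have hSk1 : S ((k : Int) + 1) = S (k : Int) + (b + (if (k : Int) < r then 1 else 0)) := by
      simp only [hS]
      split_ifs with h
      · have : ((k : Int) + 1) * b = (k : Int) * b + b := by ring
        omega
      · have : ((k : Int) + 1) * b = (k : Int) * b + b := by ring
        omega
    set c : Int := b + (if (k : Int) < r then 1 else 0) with hc
    have hc0 : 0 ≤ c := by simp only [hc]; split_ifs <;> omega
    obtain ⟨h2, h1, h3⟩ := pv_inner_spec x (PySem.List.pyRange 0 c 1) d (S (k : Int) + 1)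
      (by intro y hy; exact hkeys y hy)
    have hlen : ((PySem.List.pyRange 0 c 1).length : Int) = c := by
      rw [PySem.List.length_pyRange_one]; omega
    rw [hlen] at h2 h1 h3
    set st1 := (PySem.List.pyRange 0 c 1).foldl (fun st2 _ => pvInner x st2) (d, S (k : Int) + 1) with hst1
    have hpair : st1 = (st1.1, S ((k : Int) + 1) + 1) := by
      have : st1.2 = S ((k : Int) + 1) + 1 := by rw [h2, hSk1]; ring
      rw [← this]
    rw [hpair]
    have hcast : ((k + 1 : Nat) : Int) = (k : Int) + 1 := by push_cast; ring
    have hres := ih (k + 1) hleq (by omega) st1.1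
      (by rw [hcast]; intro y hy; have h := h3 y hy
          have : y < S ((k : Int) + 1) + 1 := by linarith [hSk1]
          exact this)
    rw [hcast] at hres
    rw [hres, h1]
    have hm1 : S (k : Int) ≤ S ((k : Int) + 1) := pv_S_mono b r hb _ _ (by omega)
    have hm2 : S ((k : Int) + 1) ≤ S (pt.length : Int) := pv_S_mono b r hb _ _ (by
      have : ((k : Int) + 1) ≤ (pt.length : Int) := by exact_mod_cast hklt
      exact this)
    rw [List.append_assoc]
    congr 1
    rw [PySem.List.pyRange_one_append (S (k : Int)) (S ((k : Int) + 1)) (S (pt.length : Int)) hm1 hm2,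
        List.map_append]
    congr 1
    have hpt : ∀ i ∈ PySem.List.pyRange (S (k : Int)) (S ((k : Int) + 1)) 1,
        ((i + 1 : Int), PySem.List.pyGetD pt (pvIdx b r (r * (b + 1)) i) "") = ((i + 1 : Int), x) := by
      intro i hi
      rw [PySem.List.mem_pyRange_one] at hi
      have hidx : pvIdx b r (r * (b + 1)) i = (k : Int) :=
        pv_idx_block b r (k : Int) i hb hi.1 hi.2
      rw [hidx, PySem.List.pyGetD_natCast, hxeq]
      simp [List.getD, hklt]
    rw [List.map_congr_left hpt]
    rw [pv_map_shift (S (k : Int)) (S ((k : Int) + 1)) (fun i => ((i + 1 : Int), x))]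
    have : S (k : Int) + 1 + c = S ((k : Int) + 1) + 1 := by rw [hSk1]; ring
    rw [this]
    apply List.map_congr_left
    intro i _
    simp

-- when every count is ≤ 0 (vehicles ≤ 0), A's loop does nothing
lemma pv_zero_fold (b r : Int) (hc : ∀ i : Int, 0 ≤ i → b + (if i < r then 1 else 0) ≤ 0) :
    ∀ (l : List String) (k : Int), 0 ≤ k → ∀ (st0 : PySem.Dict Int String × Int),
    ((PySem.List.enumerate l k).foldl
       (fun st ip =>
         (PySem.List.pyRange 0 (b + (if ip.1 < r then 1 else 0)) 1).foldl
           (fun st2 _ => pvInner ip.2 st2) st)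
       st0) = st0 := by
  intro l
  induction l with
  | nil => intro k hk st0; simp [PySem.List.enumerate_nil]
  | cons x l ih =>
    intro k hk st0
    rw [PySem.List.enumerate_cons, List.foldl_cons]
    have : PySem.List.pyRange 0 (b + (if k < r then 1 else 0)) 1 = [] :=
      PySem.List.pyRange_one_eq_nil (by have := hc k hk; omega)
    rw [this]
    simpa using ih (k + 1) (by omega) st0

-- ===== VERDICT (by name: the statement is the Claim_ definition above) =====
theorem selected_path_spec : Claim_equal_selected_path := by
  unfold Claim_equal_selected_path
  intro v pt _ hpt
  unfold Pre_selected_path at hpt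
  unfold Spec_selected_path
  have hn : 0 < pt.length := List.length_pos_iff.mpr hpt
  have hNpos : (0 : Int) < (pt.length : Int) := by exact_mod_cast hn
  simp only [selected_path, selected_path_alt, PySem.List.len_eq]
  obtain ⟨b, hbdef⟩ : ∃ b, PySem.Int.floordiv v (pt.length : Int) = b := ⟨_, rfl⟩
  obtain ⟨r, hrdef⟩ : ∃ r, PySem.Int.mod v (pt.length : Int) = r := ⟨_, rfl⟩
  simp only [hbdef, hrdef]
  have hr0 : 0 ≤ r := hrdef ▸ PySem.Int.mod_nonneg v hNpos
  have hrN : r < (pt.length : Int) := hrdef ▸ PySem.Int.mod_lt v hNpos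
  have hid : b * (pt.length : Int) + r = v := by
    rw [← hbdef, ← hrdef]; exact PySem.Int.floordiv_mul_add_mod v (pt.length : Int)
  by_cases hv : v ≤ 0
  · -- every count is ≤ 0: both sides are the empty dict
    have hc : ∀ i : Int, 0 ≤ i → b + (if i < r then 1 else 0) ≤ 0 := by
      intro i hi
      by_cases hb0 : 0 ≤ b
      · have hbN : 0 ≤ b * (pt.length : Int) := mul_nonneg hb0 (le_of_lt hNpos)
        have hb00 : b = 0 := by
          rcases mul_eq_zero.mp (by omega : b * (pt.length : Int) = 0) with h | h
          · exact h
          · omega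
        split_ifs <;> omega
      · rw [not_le] at hb0
        split_ifs <;> omega
    rw [pv_zero_fold b r hc pt 0 (le_refl 0) (PySem.Dict.empty, 1)]
    rw [PySem.List.pyRange_one_eq_nil (by omega : v + 1 ≤ 1)]
    simp
  · rw [not_le] at hv
    have hb : 0 ≤ b := by
      rw [← hbdef, PySem.Int.floordiv_eq_ediv_of_pos hNpos]
      exact Int.ediv_nonneg (by omega) (by omega)
    have hA := pv_outer_spec pt b r hb pt 0 (by simp) (Nat.zero_le _)
      PySem.Dict.empty (by simp [PySem.Dict.keys_empty])
    have hSn : ((pt.length : Int)) * b + min ((pt.length : Int)) r = v := by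
      have : min ((pt.length : Int)) r = r := by omega
      rw [this]; linarith [hid]
    simp only [Nat.cast_zero] at hA
    rw [show ((0:Int) * b + min (0:Int) r) = 0 by omega, hSn] at hA
    norm_num at hA
    rw [hA]
    have hB := PySem.Dict.items_foldl_insert_fresh (PySem.List.pyRange 1 (v + 1) 1)
      (fun a => a)
      (fun a => PySem.List.pyGetD pt (pvIdx b r (r * (b + 1)) (a - 1)) "")
      PySem.Dict.empty
      (by intro a _; simp [PySem.Dict.contains_empty])
      (by simpa using PySem.List.nodup_pyRange_one 1 (v + 1))
    simp only [] at hB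
    rw [hB]
    norm_num
    rw [pv_map_shift 0 v (fun i => ((i + 1 : Int), PySem.List.pyGetD pt (pvIdx b r (r * (b + 1)) i) ""))]
    norm_num
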